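-- pv_equiv track=rewrite | github.com/vacp2p/10ksim | analysis/kad.py | classify_lookup
-- ===== SOURCE A (Python) =====
-- def classify_lookup(peers):
--     statuses = [p["responded"] for p in peers]
--
--     if "success" in statuses:
--         return "success"
--     if "timeout" in statuses:
--         return "timeout"
--
--     has_other_error = any(s not in {"success", "timeout", "missing", "unknown"} for s in statuses)
--     if has_other_error:
--         return "other_error"
--
--     return "other_error" if "unknown" in statuses else "timeout"
-- ===== SOURCE B (Python) =====
-- _TABLE = {
--     "success": (0, "success"),
--     "timeout": (1, "timeout"),
--     "unknown": (3, "other_error"),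
--     "missing": (4, "timeout"),
-- }
--
-- def classify_lookup(peers):
--     best = (5, "timeout")
--     for p in peers:
--         entry = _TABLE.get(p["responded"], (2, "other_error"))
--         if entry[0] < best[0]:
--             best = entry
--     return best[1]
-- ===== Notes on version B (the rewrite author's own statement) =====
-- stated objective: alternative
-- what changed: Replaces the build-statuses-list-then-four-membership-scans decision chain by a single table-driven pass that keeps the argmin of a (priority, label) rank per peer, returning the label of the smallest rank.
import Mathlib
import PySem

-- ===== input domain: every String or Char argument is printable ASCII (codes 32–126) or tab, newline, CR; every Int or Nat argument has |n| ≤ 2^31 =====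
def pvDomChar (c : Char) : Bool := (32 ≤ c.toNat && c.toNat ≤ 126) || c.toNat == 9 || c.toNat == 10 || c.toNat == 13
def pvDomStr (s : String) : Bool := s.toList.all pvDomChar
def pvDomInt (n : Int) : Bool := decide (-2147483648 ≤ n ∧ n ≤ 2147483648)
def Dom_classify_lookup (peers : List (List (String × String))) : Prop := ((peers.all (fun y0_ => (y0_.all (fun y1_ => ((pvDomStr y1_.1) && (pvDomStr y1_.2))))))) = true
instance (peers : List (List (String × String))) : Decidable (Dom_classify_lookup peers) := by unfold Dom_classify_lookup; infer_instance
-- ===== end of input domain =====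

-- B replaces A's statuses-list plus four membership scans by one table-driven argmin pass; same cost, different decomposition.

-- ===== PORT A =====
-- p["responded"] : first-match dict lookup; none (= Python KeyError) is excluded by Pre_, so .getD "" is never reached inside Pre_.
def pvResp (p : List (String × String)) : String :=
  ((PySem.Dict.mk p).get? "responded").getD ""

def classify_lookup (peers : List (List (String × String))) : String :=
  let statuses := peers.map pvResp
  if statuses.contains "success" then "success"
  else if statuses.contains "timeout" then "timeout"
  else if statuses.any (fun s => !(s == "success" || s == "timeout" || s == "missing" || s == "unknown")) then "other_error"
  else if statuses.contains "unknown" then "other_error"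
  else "timeout"

-- ===== PORT B =====
-- _TABLE.get(s, (2, "other_error"))
def pvRank (s : String) : Nat × String :=
  if s = "success" then (0, "success")
  else if s = "timeout" then (1, "timeout")
  else if s = "unknown" then (3, "other_error")
  else if s = "missing" then (4, "timeout")
  else (2, "other_error")

def classify_lookup_alt (peers : List (List (String × String))) : String :=
  (peers.foldl (fun best p =>
      if (pvRank (pvResp p)).1 < best.1 then pvRank (pvResp p) else best) (5, "timeout")).2

-- ===== PRECONDITION & SPEC =====
-- Pre_ excludes exactly the inputs where some peer dict lacks the key "responded": there Python A raises KeyError (and so does B).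
def Pre_classify_lookup (peers : List (List (String × String))) : Prop :=
  ∀ p ∈ peers, (PySem.Dict.mk p).contains "responded" = true
instance (peers : List (List (String × String))) : Decidable (Pre_classify_lookup peers) := by unfold Pre_classify_lookup; infer_instance

def pvWitness_classify_lookup : (List (List (String × String))) := [[("responded", "success")], [("responded", "missing")]]

def Spec_classify_lookup (peers : List (List (String × String))) (out : String) : Prop := out = classify_lookup_alt peers
instance (peers : List (List (String × String))) (out : String) : Decidable (Spec_classify_lookup peers out) := by unfold Spec_classify_lookup; infer_instance

-- ===== CLAIM (what is proved, stated in full; the proofs are below) =====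
def Claim_equal_classify_lookup : Prop := ∀ (peers : List (List (String × String))), Dom_classify_lookup peers → Pre_classify_lookup peers → Spec_classify_lookup peers (classify_lookup peers)

-- ===== LEMMAS AND PROOFS =====

-- the label is a function of the rank
def pvLabel (n : Nat) : String :=
  match n with
  | 0 => "success" | 1 => "timeout" | 2 => "other_error" | 3 => "other_error" | _ => "timeout"

def pvRk (s : String) : Nat := (pvRank s).1

lemma pvRank_eq (s : String) : pvRank s = (pvRk s, pvLabel (pvRk s)) := by
  unfold pvRk pvLabel pvRank
  split_ifs <;> rfl

lemma pvRk_eq_zero (s : String) : pvRk s = 0 ↔ s = "success" := by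
  unfold pvRk pvRank; split_ifs <;> simp_all

lemma pvRk_eq_one (s : String) : pvRk s = 1 ↔ s = "timeout" := by
  unfold pvRk pvRank; split_ifs <;> simp_all

-- B's fold carries (r, pvLabel r) and computes the minimum of the ranks
lemma fold_pair (L : List (List (String × String))) (r : Nat) :
    L.foldl (fun best p =>
        if (pvRank (pvResp p)).1 < best.1 then pvRank (pvResp p) else best) (r, pvLabel r)
      = (L.foldl (fun a p => min a (pvRk (pvResp p))) r,
         pvLabel (L.foldl (fun a p => min a (pvRk (pvResp p))) r)) := by
  induction L generalizing r with
  | nil => rfl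
  | cons p L ih =>
      simp only [List.foldl_cons]
      have hstep : (if (pvRank (pvResp p)).1 < (r, pvLabel r).1 then pvRank (pvResp p) else (r, pvLabel r))
          = (min r (pvRk (pvResp p)), pvLabel (min r (pvRk (pvResp p)))) := by
        rw [pvRank_eq]
        by_cases h : pvRk (pvResp p) < r
        · simp [h, Nat.min_eq_right (Nat.le_of_lt h)]
        · simp [h, Nat.min_eq_left (Nat.le_of_not_lt h)]
      rw [hstep, ih]

-- the min-fold: bounds and attainment
lemma fold_min_spec (L : List String) (r : Nat) :
    (L.foldl (fun a s => min a (pvRk s)) r) ≤ r ∧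
    (∀ s ∈ L, (L.foldl (fun a s => min a (pvRk s)) r) ≤ pvRk s) ∧
    ((L.foldl (fun a s => min a (pvRk s)) r) = r ∨
      ∃ s ∈ L, (L.foldl (fun a s => min a (pvRk s)) r) = pvRk s) := by
  induction L generalizing r with
  | nil => simp
  | cons t L ih =>
      obtain ⟨h1, h2, h3⟩ := ih (min r (pvRk t))
      refine ⟨le_trans h1 (by omega), ?_, ?_⟩
      · intro s hs
        rcases List.mem_cons.mp hs with rfl | hs
        · exact le_trans h1 (by omega)
        · exact h2 s hs
      · rcases h3 with h | ⟨s, hs, h⟩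
        · rcases Nat.le_total r (pvRk t) with hc | hc
          · left; simpa [Nat.min_eq_left hc] using h
          · right; exact ⟨t, by simp, by simpa [Nat.min_eq_right hc] using h⟩
        · right; exact ⟨s, by simp [hs], h⟩

lemma main_lemma (L : List String) :
    (if L.contains "success" then "success"
     else if L.contains "timeout" then "timeout"
     else if L.any (fun s => !(s == "success" || s == "timeout" || s == "missing" || s == "unknown")) then "other_error"
     else if L.contains "unknown" then "other_error"
     else "timeout")
    = pvLabel (L.foldl (fun a s => min a (pvRk s)) 5) := by
  obtain ⟨hle, hmem, hatt⟩ := fold_min_spec L 5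
  set m := L.foldl (fun a s => min a (pvRk s)) 5 with hm
  split_ifs with hA hB hC hD
  · have h1 : "success" ∈ L := by simpa using hA
    have hub := hmem _ h1
    rw [(pvRk_eq_zero "success").mpr rfl] at hub
    have hm0 : m = 0 := by omega
    rw [hm0]; rfl
  · have h1 : "success" ∉ L := by simpa using hA
    have h2 : "timeout" ∈ L := by simpa using hB
    have hub := hmem _ h2
    rw [(pvRk_eq_one "timeout").mpr rfl] at hub
    have hm1 : m = 1 := by
      rcases hatt with h | ⟨s, hs, h⟩
      · omega
      · have : pvRk s ≠ 0 := fun he => h1 (((pvRk_eq_zero s).mp he) ▸ hs)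
        omega
    rw [hm1]; rfl
  · have h1 : "success" ∉ L := by simpa using hA
    have h2 : "timeout" ∉ L := by simpa using hB
    obtain ⟨t, ht, hp⟩ := List.any_eq_true.mp hC
    simp only [Bool.not_eq_eq_eq_not, Bool.not_true, Bool.or_eq_false_iff, beq_eq_false_iff_ne] at hp
    obtain ⟨⟨⟨n1, n2⟩, n3⟩, n4⟩ := hp
    have hrk2 : pvRk t = 2 := by simp [pvRk, pvRank, n1, n2, n3, n4]
    have hub : m ≤ 2 := hrk2 ▸ hmem t ht
    have hm2 : m = 2 := by
      rcases hatt with h | ⟨s, hs, h⟩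
      · omega
      · have hn0 : pvRk s ≠ 0 := fun he => h1 (((pvRk_eq_zero s).mp he) ▸ hs)
        have hn1 : pvRk s ≠ 1 := fun he => h2 (((pvRk_eq_one s).mp he) ▸ hs)
        omega
    rw [hm2]; rfl
  · -- no success/timeout/other; "unknown" present
    have hall : ∀ s ∈ L, s = "missing" ∨ s = "unknown" := by
      intro s hs
      have hC' : ∀ x ∈ L, ¬x = "success" → ¬x = "timeout" → ¬x = "missing" → x = "unknown" := by
        simpa using hC
      by_cases hms : s = "missing"
      · exact Or.inl hms
      · have h1 : "success" ∉ L := by simpa using hA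
        have h2 : "timeout" ∉ L := by simpa using hB
        exact Or.inr (hC' s hs (fun he => h1 (he ▸ hs)) (fun he => h2 (he ▸ hs)) hms)
    have hge3 : ∀ s ∈ L, 3 ≤ pvRk s := by
      intro s hs
      rcases hall s hs with he | he <;> simp [pvRk, pvRank, he]
    have h4 : "unknown" ∈ L := by simpa using hD
    have hub : m ≤ 3 := by
      have h := hmem _ h4
      have : pvRk "unknown" = 3 := by simp [pvRk, pvRank]
      omega
    have hm3 : m = 3 := by
      rcases hatt with h | ⟨s, hs, h⟩
      · omega
      · have := hge3 s hs; omega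
    rw [hm3]; rfl
  · have hall : ∀ s ∈ L, s = "missing" ∨ s = "unknown" := by
      intro s hs
      have hC' : ∀ x ∈ L, ¬x = "success" → ¬x = "timeout" → ¬x = "missing" → x = "unknown" := by
        simpa using hC
      by_cases hms : s = "missing"
      · exact Or.inl hms
      · have h1 : "success" ∉ L := by simpa using hA
        have h2 : "timeout" ∉ L := by simpa using hB
        exact Or.inr (hC' s hs (fun he => h1 (he ▸ hs)) (fun he => h2 (he ▸ hs)) hms)
    have h4 : "unknown" ∉ L := by simpa using hD
    have hge4 : 4 ≤ m := by
      rcases hatt with h | ⟨s, hs, h⟩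
      · omega
      · rcases hall s hs with he | he
        · have : pvRk s = 4 := by simp [pvRk, pvRank, he]
          omega
        · exact absurd (he ▸ hs) h4
    have : m = 4 ∨ m = 5 := by omega
    rcases this with h | h <;> rw [h] <;> rfl

-- ===== VERDICT (by name: the statement is the Claim_ definition above) =====
theorem classify_lookup_spec : Claim_equal_classify_lookup := by
  intro peers _ _
  unfold Spec_classify_lookup classify_lookup classify_lookup_alt
  rw [show ((5 : Nat), "timeout") = ((5 : Nat), pvLabel 5) from rfl, fold_pair]
  rw [show (peers.foldl (fun a p => min a (pvRk (pvResp p))) 5)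
        = ((peers.map pvResp).foldl (fun a s => min a (pvRk s)) 5) from (List.foldl_map (f := pvResp) (g := fun a s => min a (pvRk s)) (l := peers) (init := 5)).symm]
  exact main_lemma (peers.map pvResp)
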